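-- pv_equiv track=rewrite | github.com/nexon33/voynich-grammar-analysis | scripts/analysis/recipe_sequence_deep_dive.py | analyze_sequence_structure
-- ===== SOURCE A (Python) =====
-- def analyze_sequence_structure(sequences):
--     """Analyze structural patterns in recipe sequences"""
--
--     patterns = {
--         "with_vessel": [],
--         "with_water": [],
--         "with_botanical": [],
--         "with_oak_gen": [],
--         "with_oat_gen": [],
--         "with_multiple_actions": [],  # More than 2 verbs
--         "with_or": [],  # Contains alternatives
--         "with_then": [],  # Sequential markers
--         "short": [],  # < 10 words
--         "medium": [],  # 10-20 words
--         "long": [],  # > 20 words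
--     }
--
--     for seq in sequences:
--         sentence = seq["sentence"]
--         word_count = len(sentence.split())
--
--         # Categorize by features
--         if "vessel" in sentence.lower():
--             patterns["with_vessel"].append(seq)
--
--         if "water" in sentence.lower():
--             patterns["with_water"].append(seq)
--
--         if "botanical-term" in sentence:
--             patterns["with_botanical"].append(seq)
--
--         if "oak-GEN" in sentence:
--             patterns["with_oak_gen"].append(seq)
--
--         if "oat-GEN" in sentence:
--             patterns["with_oat_gen"].append(seq)
--
--         # Count verbs
--         verb_count = sentence.count("-VERB")
--         if verb_count > 2:
--             patterns["with_multiple_actions"].append(seq)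
--
--         if "OR" in sentence:
--             patterns["with_or"].append(seq)
--
--         if "THEN" in sentence:
--             patterns["with_then"].append(seq)
--
--         # Length categories
--         if word_count < 10:
--             patterns["short"].append(seq)
--         elif word_count < 20:
--             patterns["medium"].append(seq)
--         else:
--             patterns["long"].append(seq)
--
--     return patterns
-- ===== SOURCE B (Python) =====
-- def analyze_sequence_structure(sequences):
--     """Analyze structural patterns in recipe sequences (eleven independent filter passes)"""
--
--     def wc(seq):
--         return len(seq["sentence"].split())
--
--     return {
--         "with_vessel": [s for s in sequences if "vessel" in s["sentence"].lower()],
--         "with_water": [s for s in sequences if "water" in s["sentence"].lower()],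
--         "with_botanical": [s for s in sequences if "botanical-term" in s["sentence"]],
--         "with_oak_gen": [s for s in sequences if "oak-GEN" in s["sentence"]],
--         "with_oat_gen": [s for s in sequences if "oat-GEN" in s["sentence"]],
--         "with_multiple_actions": [s for s in sequences if s["sentence"].count("-VERB") > 2],
--         "with_or": [s for s in sequences if "OR" in s["sentence"]],
--         "with_then": [s for s in sequences if "THEN" in s["sentence"]],
--         "short": [s for s in sequences if wc(s) < 10],
--         "medium": [s for s in sequences if 10 <= wc(s) < 20],
--         "long": [s for s in sequences if wc(s) >= 20],
--     }
-- ===== Notes on version B (the rewrite author's own statement) =====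
-- stated objective: alternative
-- what changed: the single accumulating pass that appends each sequence into 11 mutable bucket lists is replaced by 11 independent filter passes (one comprehension per bucket), with the elif length chain turned into three mutually exclusive range predicates
import Mathlib
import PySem

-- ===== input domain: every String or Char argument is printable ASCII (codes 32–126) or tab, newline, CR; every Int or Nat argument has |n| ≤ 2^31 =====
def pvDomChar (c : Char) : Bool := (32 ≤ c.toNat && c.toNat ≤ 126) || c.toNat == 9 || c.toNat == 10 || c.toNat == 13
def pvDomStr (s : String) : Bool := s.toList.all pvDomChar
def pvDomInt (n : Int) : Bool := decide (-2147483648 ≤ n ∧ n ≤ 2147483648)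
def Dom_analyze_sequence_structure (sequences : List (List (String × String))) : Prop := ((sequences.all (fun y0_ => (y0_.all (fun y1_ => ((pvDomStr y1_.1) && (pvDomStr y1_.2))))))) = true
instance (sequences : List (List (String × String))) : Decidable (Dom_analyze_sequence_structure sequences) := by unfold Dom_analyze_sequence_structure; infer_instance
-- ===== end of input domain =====

-- B replaces A's single accumulating pass over `sequences` (11 mutable bucket lists) by
-- eleven independent filter passes, one per bucket; same cost, different decomposition.

-- seq["sentence"] : first match in the association list (Pre_ guarantees the key is present)
def pvSent (seq : List (String × String)) : String :=
  (((seq.find? (fun p => p.1 == "sentence")).map (·.2)).getD "")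

-- ===== PORT A =====
-- loop body of A: one step of the accumulating pass over the 11 bucket lists
def pvStepA
    (acc : List (List (String × String)) × List (List (String × String)) × List (List (String × String)) ×
           List (List (String × String)) × List (List (String × String)) × List (List (String × String)) ×
           List (List (String × String)) × List (List (String × String)) × List (List (String × String)) ×
           List (List (String × String)) × List (List (String × String)))
    (seq : List (String × String)) :
    List (List (String × String)) × List (List (String × String)) × List (List (String × String)) ×
    List (List (String × String)) × List (List (String × String)) × List (List (String × String)) ×
    List (List (String × String)) × List (List (String × String)) × List (List (String × String)) ×
    List (List (String × String)) × List (List (String × String)) :=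
  match acc with
  | (ves, wat, bot, oak, oat, mul, or_, thn, sh, me, lo) =>
    let sentence := pvSent seq
    let word_count := (PySem.Str.split₀ sentence).length
    let ves := if PySem.Str.isIn "vessel" (PySem.Str.lower sentence) then ves ++ [seq] else ves
    let wat := if PySem.Str.isIn "water" (PySem.Str.lower sentence) then wat ++ [seq] else wat
    let bot := if PySem.Str.isIn "botanical-term" sentence then bot ++ [seq] else bot
    let oak := if PySem.Str.isIn "oak-GEN" sentence then oak ++ [seq] else oak
    let oat := if PySem.Str.isIn "oat-GEN" sentence then oat ++ [seq] else oat
    let verb_count := PySem.Str.count sentence "-VERB"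
    let mul := if 2 < verb_count then mul ++ [seq] else mul
    let or_ := if PySem.Str.isIn "OR" sentence then or_ ++ [seq] else or_
    let thn := if PySem.Str.isIn "THEN" sentence then thn ++ [seq] else thn
    -- if / elif / else on word_count
    let sh := if word_count < 10 then sh ++ [seq] else sh
    let me := if word_count < 10 then me else if word_count < 20 then me ++ [seq] else me
    let lo := if word_count < 10 then lo else if word_count < 20 then lo else lo ++ [seq]
    (ves, wat, bot, oak, oat, mul, or_, thn, sh, me, lo)

def analyze_sequence_structure (sequences : List (List (String × String))) : List (String × List (List (String × String))) :=
  match sequences.foldl pvStepA ([], [], [], [], [], [], [], [], [], [], []) with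
  | (ves, wat, bot, oak, oat, mul, or_, thn, sh, me, lo) =>
    [("with_vessel", ves), ("with_water", wat), ("with_botanical", bot),
     ("with_oak_gen", oak), ("with_oat_gen", oat), ("with_multiple_actions", mul),
     ("with_or", or_), ("with_then", thn), ("short", sh), ("medium", me), ("long", lo)]

-- ===== PORT B =====
-- helper `wc` of Source B
def pvWc (seq : List (String × String)) : Nat := (PySem.Str.split₀ (pvSent seq)).length

def analyze_sequence_structure_alt (sequences : List (List (String × String))) : List (String × List (List (String × String))) :=
  [("with_vessel", sequences.filter (fun s => PySem.Str.isIn "vessel" (PySem.Str.lower (pvSent s)))),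
   ("with_water", sequences.filter (fun s => PySem.Str.isIn "water" (PySem.Str.lower (pvSent s)))),
   ("with_botanical", sequences.filter (fun s => PySem.Str.isIn "botanical-term" (pvSent s))),
   ("with_oak_gen", sequences.filter (fun s => PySem.Str.isIn "oak-GEN" (pvSent s))),
   ("with_oat_gen", sequences.filter (fun s => PySem.Str.isIn "oat-GEN" (pvSent s))),
   ("with_multiple_actions", sequences.filter (fun s => 2 < PySem.Str.count (pvSent s) "-VERB")),
   ("with_or", sequences.filter (fun s => PySem.Str.isIn "OR" (pvSent s))),
   ("with_then", sequences.filter (fun s => PySem.Str.isIn "THEN" (pvSent s))),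
   ("short", sequences.filter (fun s => pvWc s < 10)),
   ("medium", sequences.filter (fun s => 10 ≤ pvWc s ∧ pvWc s < 20)),
   ("long", sequences.filter (fun s => 20 ≤ pvWc s))]

-- ===== PRECONDITION & SPEC =====
-- Pre_ excludes exactly the inputs where some element has no "sentence" key: there A (and B) raise KeyError.
def Pre_analyze_sequence_structure (sequences : List (List (String × String))) : Prop :=
  (sequences.all (fun seq => seq.any (fun p => p.1 == "sentence"))) = true
instance (sequences : List (List (String × String))) : Decidable (Pre_analyze_sequence_structure sequences) := by
  unfold Pre_analyze_sequence_structure; infer_instance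

def pvWitness_analyze_sequence_structure : (List (List (String × String))) :=
  [[("sentence", "add water to the vessel THEN boil-VERB stir-VERB cool-VERB OR wait")]]

def Spec_analyze_sequence_structure (sequences : List (List (String × String))) (out : List (String × List (List (String × String)))) : Prop := out = analyze_sequence_structure_alt sequences
instance (sequences : List (List (String × String))) (out : List (String × List (List (String × String)))) : Decidable (Spec_analyze_sequence_structure sequences out) := by unfold Spec_analyze_sequence_structure; infer_instance

-- ===== CLAIM (what is proved, stated in full; the proofs are below) =====
def Claim_equal_analyze_sequence_structure : Prop := ∀ (sequences : List (List (String × String))), Dom_analyze_sequence_structure sequences → Pre_analyze_sequence_structure sequences → Spec_analyze_sequence_structure sequences (analyze_sequence_structure sequences)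

-- ===== LEMMAS AND PROOFS =====

-- invariant of A's pass: each bucket accumulator ends as its start value ++ the filtered list
theorem pvFoldA (l : List (List (String × String)))
    (ves wat bot oak oat mul or_ thn sh me lo : List (List (String × String))) :
    l.foldl pvStepA (ves, wat, bot, oak, oat, mul, or_, thn, sh, me, lo) =
      (ves ++ l.filter (fun s => PySem.Str.isIn "vessel" (PySem.Str.lower (pvSent s))),
       wat ++ l.filter (fun s => PySem.Str.isIn "water" (PySem.Str.lower (pvSent s))),
       bot ++ l.filter (fun s => PySem.Str.isIn "botanical-term" (pvSent s)),
       oak ++ l.filter (fun s => PySem.Str.isIn "oak-GEN" (pvSent s)),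
       oat ++ l.filter (fun s => PySem.Str.isIn "oat-GEN" (pvSent s)),
       mul ++ l.filter (fun s => 2 < PySem.Str.count (pvSent s) "-VERB"),
       or_ ++ l.filter (fun s => PySem.Str.isIn "OR" (pvSent s)),
       thn ++ l.filter (fun s => PySem.Str.isIn "THEN" (pvSent s)),
       sh ++ l.filter (fun s => pvWc s < 10),
       me ++ l.filter (fun s => 10 ≤ pvWc s ∧ pvWc s < 20),
       lo ++ l.filter (fun s => 20 ≤ pvWc s)) := by
  induction l generalizing ves wat bot oak oat mul or_ thn sh me lo with
  | nil => simp
  | cons x xs ih =>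
    rw [List.foldl_cons]
    show List.foldl pvStepA (pvStepA (ves, wat, bot, oak, oat, mul, or_, thn, sh, me, lo) x) xs = _
    simp only [pvStepA]
    rw [ih]
    simp only [Prod.mk.injEq, List.filter_cons, pvWc]
    refine ⟨?_, ?_, ?_, ?_, ?_, ?_, ?_, ?_, ?_, ?_, ?_⟩ <;>
      split_ifs <;> simp_all <;> omega

-- ===== VERDICT (by name: the statement is the Claim_ definition above) =====
theorem analyze_sequence_structure_spec : Claim_equal_analyze_sequence_structure := by
  intro sequences _ _
  unfold Spec_analyze_sequence_structure analyze_sequence_structure analyze_sequence_structure_alt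
  rw [pvFoldA]
  simp [pvWc]
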